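-- pv_equiv track=rewrite | github.com/onigaandreea/collage-stuff | sem5/PPD/proiect2/main_secv.py | convolution_row_sequential
-- ===== SOURCE A (Python) =====
-- def convolution_row_sequential(i, N, M, n, m, matrix, convolution_matrix):
--     result_row = []
--
--     for j in range(M):
--         accumulator = 0
--         for k in range(n):
--             for l in range(m):
--                 ii = i + k - (n // 2)
--                 ii = 0 if ii <= -1 else (N - 1) if ii >= N else ii
--                 jj = j + l - (m // 2)
--                 jj = 0 if jj <= -1 else (M - 1) if jj >= M else jj
--                 accumulator += matrix[ii][jj] * convolution_matrix[k][l]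
--         result_row.append(accumulator)
--
--     return result_row
-- ===== SOURCE B (Python) =====
-- def convolution_row_sequential(i, N, M, n, m, matrix, convolution_matrix):
--     # Border-replication padding: pad each needed source row once, then every output
--     # pixel is a plain sliding-window dot product with no per-access clamping.
--     if M <= 0:
--         return []
--     if n <= 0 or m <= 0:
--         return [0] * M
--     half = m // 2
--     padded = []
--     for k in range(n):
--         ii = i + k - n // 2
--         ii = 0 if ii <= -1 else (N - 1) if ii >= N else ii
--         row = matrix[ii]
--         padded.append([row[0]] * half + list(row[:M]) + [row[M - 1]] * (m - 1 - half))
--     return [sum(p * w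
--                 for pr, kr in zip(padded, convolution_matrix)
--                 for p, w in zip(pr[j:j + m], kr))
--             for j in range(M)]
-- ===== Notes on version B (the rewrite author's own statement) =====
-- stated objective: alternative
-- what changed: A clamps both indices inside a per-pixel triple loop; B instead materializes border-replicated padded copies of the needed source rows once (a staged pass), after which each output pixel is a plain sliding-window dot product over slices with no clamping at all.
import Mathlib
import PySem

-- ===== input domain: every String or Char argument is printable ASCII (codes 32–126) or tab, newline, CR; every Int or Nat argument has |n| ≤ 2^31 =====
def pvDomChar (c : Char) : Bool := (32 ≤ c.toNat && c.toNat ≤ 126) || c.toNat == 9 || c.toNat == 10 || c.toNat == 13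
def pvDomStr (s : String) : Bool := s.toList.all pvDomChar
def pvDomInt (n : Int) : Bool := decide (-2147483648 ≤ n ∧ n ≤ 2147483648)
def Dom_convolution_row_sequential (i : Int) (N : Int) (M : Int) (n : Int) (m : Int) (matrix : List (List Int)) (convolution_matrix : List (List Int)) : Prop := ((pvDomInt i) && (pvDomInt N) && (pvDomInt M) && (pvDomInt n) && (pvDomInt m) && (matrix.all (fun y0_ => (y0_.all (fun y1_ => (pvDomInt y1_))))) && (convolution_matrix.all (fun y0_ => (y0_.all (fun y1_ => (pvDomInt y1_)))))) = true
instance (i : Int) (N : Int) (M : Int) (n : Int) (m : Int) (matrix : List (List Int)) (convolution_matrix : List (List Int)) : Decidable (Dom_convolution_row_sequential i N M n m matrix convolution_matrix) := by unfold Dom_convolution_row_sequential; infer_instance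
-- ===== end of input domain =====

-- ===== PORT A =====
-- B replaces A's per-access index clamping by border-replicated padded row copies built once,
-- turning each output pixel into a plain sliding-window dot product (alternative decomposition,
-- same asymptotic cost); return value only.
def convolution_row_sequential (i : Int) (N : Int) (M : Int) (n : Int) (m : Int) (matrix : List (List Int)) (convolution_matrix : List (List Int)) : List Int :=
  (PySem.List.pyRange 0 M 1).foldl
    (fun result_row j =>
      let accumulator :=
        (PySem.List.pyRange 0 n 1).foldl
          (fun acc k =>
            (PySem.List.pyRange 0 m 1).foldl
              (fun acc l =>
                let ii := i + k - PySem.Int.floordiv n 2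
                let ii := if ii ≤ -1 then 0 else if ii ≥ N then N - 1 else ii
                let jj := j + l - PySem.Int.floordiv m 2
                let jj := if jj ≤ -1 then 0 else if jj ≥ M then M - 1 else jj
                acc + PySem.List.pyGetD (PySem.List.pyGetD matrix ii []) jj 0 *
                      PySem.List.pyGetD (PySem.List.pyGetD convolution_matrix k []) l 0)
              acc)
          0
      result_row ++ [accumulator])
    []

-- ===== PORT B =====
def convolution_row_sequential_alt (i : Int) (N : Int) (M : Int) (n : Int) (m : Int) (matrix : List (List Int)) (convolution_matrix : List (List Int)) : List Int :=
  if M ≤ 0 then []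
  else if n ≤ 0 ∨ m ≤ 0 then PySem.List.pyRepeat [0] M
  else
    let half := PySem.Int.floordiv m 2
    let padded :=
      (PySem.List.pyRange 0 n 1).foldl
        (fun padded k =>
          let ii := i + k - PySem.Int.floordiv n 2
          let ii := if ii ≤ -1 then 0 else if ii ≥ N then N - 1 else ii
          let row := PySem.List.pyGetD matrix ii []
          padded ++ [PySem.List.pyRepeat [PySem.List.pyGetD row 0 0] half
                      ++ PySem.List.slice row none (some M)
                      ++ PySem.List.pyRepeat [PySem.List.pyGetD row (M - 1) 0] (m - 1 - half)])
        []
    (PySem.List.pyRange 0 M 1).map (fun j =>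
      ((padded.zip convolution_matrix).map (fun pk =>
        (((PySem.List.slice pk.1 (some j) (some (j + m))).zip pk.2).map
          (fun pw => pw.1 * pw.2)).sum)).sum)

-- ===== PRECONDITION & SPEC =====
-- Pre_ excludes exactly the inputs on which the Python raises IndexError: when all three
-- loops run (M,n,m > 0), every accessed (clamped, possibly Python-negative) matrix row must
-- exist with at least M columns, and each kernel row k < n must exist with at least m columns.
def Pre_convolution_row_sequential (i : Int) (N : Int) (M : Int) (n : Int) (m : Int) (matrix : List (List Int)) (convolution_matrix : List (List Int)) : Prop :=
  0 < M → 0 < n → 0 < m →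
    (n ≤ (convolution_matrix.length : Int))
    ∧ (∀ kr ∈ convolution_matrix.take n.toNat, m ≤ (kr.length : Int))
    ∧ (∀ k ∈ List.range n.toNat,
        M ≤ ((PySem.List.pyGetD matrix
              (let ii := i + (k : Int) - PySem.Int.floordiv n 2
               if ii ≤ -1 then 0 else if ii ≥ N then N - 1 else ii) []).length : Int))
instance (i : Int) (N : Int) (M : Int) (n : Int) (m : Int) (matrix : List (List Int)) (convolution_matrix : List (List Int)) : Decidable (Pre_convolution_row_sequential i N M n m matrix convolution_matrix) := by unfold Pre_convolution_row_sequential; infer_instance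

def pvWitness_convolution_row_sequential : Int × Int × Int × Int × Int × List (List Int) × List (List Int) :=
  (0, 2, 2, 2, 2, [[1, 2], [3, 4]], [[1, 0], [0, 1]])

def Spec_convolution_row_sequential (i : Int) (N : Int) (M : Int) (n : Int) (m : Int) (matrix : List (List Int)) (convolution_matrix : List (List Int)) (out : List Int) : Prop := out = convolution_row_sequential_alt i N M n m matrix convolution_matrix
instance (i : Int) (N : Int) (M : Int) (n : Int) (m : Int) (matrix : List (List Int)) (convolution_matrix : List (List Int)) (out : List Int) : Decidable (Spec_convolution_row_sequential i N M n m matrix convolution_matrix out) := by unfold Spec_convolution_row_sequential; infer_instance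

-- ===== CLAIM (what is proved, stated in full; the proofs are below) =====
def Claim_equal_convolution_row_sequential : Prop := ∀ (i : Int) (N : Int) (M : Int) (n : Int) (m : Int) (matrix : List (List Int)) (convolution_matrix : List (List Int)), Dom_convolution_row_sequential i N M n m matrix convolution_matrix → Pre_convolution_row_sequential i N M n m matrix convolution_matrix → Spec_convolution_row_sequential i N M n m matrix convolution_matrix (convolution_row_sequential i N M n m matrix convolution_matrix)

-- ===== LEMMAS AND PROOFS =====

-- the clamped source row both programs read for kernel row k
def pvRow (i N n : Int) (matrix : List (List Int)) (k : Int) : List Int :=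
  PySem.List.pyGetD matrix
    (let ii := i + k - PySem.Int.floordiv n 2
     if ii ≤ -1 then 0 else if ii ≥ N then N - 1 else ii) []

-- the single multiply-add term both programs compute for output column j and kernel cell (k,l)
def pvTerm (i N M n m : Int) (matrix convolution_matrix : List (List Int)) (j k l : Int) : Int :=
  let jj := j + l - PySem.Int.floordiv m 2
  let jj := if jj ≤ -1 then 0 else if jj ≥ M then M - 1 else jj
  PySem.List.pyGetD (pvRow i N n matrix k) jj 0 *
  PySem.List.pyGetD (PySem.List.pyGetD convolution_matrix k []) l 0

def pvCell (i N M n m : Int) (matrix convolution_matrix : List (List Int)) (j : Int) : Int :=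
  ((PySem.List.pyRange 0 n 1).map (fun k =>
    ((PySem.List.pyRange 0 m 1).map (fun l => pvTerm i N M n m matrix convolution_matrix j k l)).sum)).sum

-- the padded row B builds for kernel row k
def pvPadRow (i N M n m : Int) (matrix : List (List Int)) (k : Int) : List Int :=
  PySem.List.pyRepeat [PySem.List.pyGetD (pvRow i N n matrix k) 0 0] (PySem.Int.floordiv m 2)
    ++ PySem.List.slice (pvRow i N n matrix k) none (some M)
    ++ PySem.List.pyRepeat [PySem.List.pyGetD (pvRow i N n matrix k) (M - 1) 0] (m - 1 - PySem.Int.floordiv m 2)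

-- a running-sum loop whose body is propositionally 'acc + g x'
theorem foldl_add_of {α : Type} (f : Int → α → Int) (g : α → Int)
    (h : ∀ acc x, f acc x = acc + g x) :
    ∀ (xs : List α) (a : Int), xs.foldl f a = a + (xs.map g).sum := by
  intro xs
  induction xs with
  | nil => intro a; simp
  | cons x xs ih => intro a; rw [List.foldl_cons, h, ih, List.map_cons, List.sum_cons, add_assoc]

theorem portA_eq (i N M n m : Int) (matrix convolution_matrix : List (List Int)) :
    convolution_row_sequential i N M n m matrix convolution_matrix
      = (PySem.List.pyRange 0 M 1).map (pvCell i N M n m matrix convolution_matrix) := by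
  unfold convolution_row_sequential
  rw [PySem.List.foldl_append_singleton_eq_map, List.nil_append]
  refine List.map_congr_left (fun j _ => ?_)
  refine Eq.trans (foldl_add_of _ (fun k =>
      ((PySem.List.pyRange 0 m 1).map (fun l => pvTerm i N M n m matrix convolution_matrix j k l)).sum)
      (fun acc k =>
        foldl_add_of _ (fun l => pvTerm i N M n m matrix convolution_matrix j k l)
          (fun a l => rfl) _ acc) _ 0) ?_
  simp [pvCell]

theorem pyRange_zero_cast (M : Int) :
    PySem.List.pyRange 0 M 1 = (List.range M.toNat).map (fun (t : Nat) => (t : Int)) := by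
  by_cases h : M ≤ 0
  · rw [PySem.List.pyRange_one_eq_nil h]
    simp [Int.toNat_of_nonpos h]
  · have hM : M = (M.toNat : Int) := (Int.toNat_of_nonneg (by omega)).symm
    rw [hM]
    exact PySem.List.pyRange_zero_natCast M.toNat

-- zip of two lists, the left one no longer, as a map over indices
theorem zip_eq_map_range {α β : Type} (xs : List α) (ys : List β) (dx : α) (dy : β)
    (h : xs.length ≤ ys.length) :
    xs.zip ys = (List.range xs.length).map (fun k => (xs.getD k dx, ys.getD k dy)) := by
  refine List.ext_getElem (by simp; omega) ?_
  intro t h1 h2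
  have hx : t < xs.length := by simpa using h2
  have hy : t < ys.length := lt_of_lt_of_le hx h
  simp [List.getElem_zip, List.getD_eq_getElem?_getD, hx, hy]

theorem getD_replicate' (hh n : Nat) (a : Int) (h : n < hh) :
    (List.replicate hh a).getD n 0 = a := by
  simp [List.getD_eq_getElem?_getD, h]

theorem getD_drop_take (xs : List Int) (t mm l : Nat) (hl : l < mm) :
    ((xs.drop t).take mm).getD l 0 = xs.getD (t + l) 0 := by
  rw [List.getD_eq_getElem?_getD, List.getD_eq_getElem?_getD]
  simp [hl, List.getElem?_drop]

-- the padded row read at offset t+l is the clamped read of the source row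
theorem pad_getD (row : List Int) (MM mm : Nat) (hM : 0 < MM) (hmm : 0 < mm)
    (hlen : MM ≤ row.length) (t l : Nat) (ht : t < MM) (hl : l < mm) :
    (List.replicate (mm / 2) (row.getD 0 0) ++ row.take MM
      ++ List.replicate (mm - 1 - mm / 2) (row.getD (MM - 1) 0)).getD (t + l) 0
      = PySem.List.pyGetD row
          (let jj := (t : Int) + (l : Int) - PySem.Int.floordiv (mm : Int) 2
           if jj ≤ -1 then 0 else if jj ≥ (MM : Int) then (MM : Int) - 1 else jj) 0 := by
  have hfd : PySem.Int.floordiv (mm : Int) 2 = ((mm / 2 : Nat) : Int) := by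
    exact_mod_cast PySem.Int.floordiv_natCast mm 2
  have hhle : mm / 2 ≤ mm - 1 := by omega
  set hh := mm / 2 with hhh
  rw [List.append_assoc, hfd]
  have htake : (row.take MM).length = MM := by simp [hlen]
  by_cases h1 : t + l < hh
  · rw [if_pos (by omega)]
    rw [List.getD_append _ _ _ _ (by simp [List.length_replicate]; omega)]
    rw [getD_replicate' hh (t + l) _ h1, PySem.List.pyGetD_zero]
  · by_cases h2 : t + l - hh < MM
    · rw [if_neg (by omega), if_neg (by omega)]
      have hjj : ((t : Int) + (l : Int) - ((hh : Nat) : Int)) = ((t + l - hh : Nat) : Int) := by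
        omega
      rw [hjj, PySem.List.pyGetD_natCast]
      rw [List.getD_append_right _ _ _ _ (by simp [List.length_replicate]; omega)]
      rw [List.length_replicate]
      rw [List.getD_append _ _ _ _ (by omega)]
      rw [List.getD_eq_getElem?_getD, List.getD_eq_getElem?_getD]
      simp [h2]
    · rw [if_neg (by omega), if_pos (by omega)]
      have hjj : ((MM : Nat) : Int) - 1 = ((MM - 1 : Nat) : Int) := by omega
      rw [hjj, PySem.List.pyGetD_natCast]
      rw [List.getD_append_right _ _ _ _ (by simp [List.length_replicate]; omega)]
      rw [List.length_replicate]
      rw [List.getD_append_right _ _ _ _ (by omega)]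
      rw [htake]
      exact getD_replicate' _ _ _ (by omega)

-- B's padded row, in Nat normal form
theorem pvPadRow_normal (i N M n m : Int) (matrix : List (List Int)) (k : Int)
    (MM mm : Nat) (hMc : M = (MM : Int)) (hmc : m = (mm : Int)) (h0M : 0 < MM) (h0m : 0 < mm) :
    pvPadRow i N M n m matrix k
      = List.replicate (mm / 2) ((pvRow i N n matrix k).getD 0 0)
        ++ (pvRow i N n matrix k).take MM
        ++ List.replicate (mm - 1 - mm / 2) ((pvRow i N n matrix k).getD (MM - 1) 0) := by
  have hfd : PySem.Int.floordiv (mm : Int) 2 = ((mm / 2 : Nat) : Int) := by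
    exact_mod_cast PySem.Int.floordiv_natCast mm 2
  have hM1 : M - 1 = ((MM - 1 : Nat) : Int) := by push_cast [hMc]; omega
  have hrep2 : m - 1 - PySem.Int.floordiv m 2 = ((mm - 1 - mm / 2 : Nat) : Int) := by
    rw [hmc, hfd]; push_cast; omega
  unfold pvPadRow
  rw [hM1, hrep2, hmc, hfd, PySem.List.pyGetD_natCast, PySem.List.pyGetD_zero,
      PySem.List.pyRepeat_singleton, PySem.List.pyRepeat_singleton,
      PySem.List.slice_to _ (by rw [hMc]; positivity), Int.toNat_natCast, Int.toNat_natCast, hMc,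
      Int.toNat_natCast]

-- one kernel row: the sliced padded-row dot product equals A's clamped inner sum
theorem kterm_eq (i N M n m : Int) (matrix cm : List (List Int)) (MM mm : Nat)
    (hMc : M = (MM : Int)) (hmc : m = (mm : Int)) (h0M : 0 < MM) (h0m : 0 < mm)
    (k : Int) (kr : List Int) (hkr : kr = PySem.List.pyGetD cm k [])
    (hrow : MM ≤ (pvRow i N n matrix k).length) (hlkr : mm ≤ kr.length)
    (t : Nat) (ht : t < MM) :
    (((PySem.List.slice (pvPadRow i N M n m matrix k) (some (t : Int)) (some ((t : Int) + m))).zip kr).map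
      (fun pw => pw.1 * pw.2)).sum
    = ((PySem.List.pyRange 0 m 1).map (fun l => pvTerm i N M n m matrix cm (t : Int) k l)).sum := by
  have hpadN := pvPadRow_normal i N M n m matrix k MM mm hMc hmc h0M h0m
  set row := pvRow i N n matrix k with hrowdef
  set padN := List.replicate (mm / 2) (row.getD 0 0) ++ row.take MM
      ++ List.replicate (mm - 1 - mm / 2) (row.getD (MM - 1) 0) with hpd
  have hlenpad : padN.length = MM + mm - 1 := by
    simp [hpd, List.length_take]
    omega
  have hslice : PySem.List.slice (pvPadRow i N M n m matrix k) (some (t : Int))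
      (some ((t : Int) + m)) = (padN.drop t).take mm := by
    rw [hpadN, hmc]
    exact_mod_cast PySem.List.slice_natCast_add padN t mm
  rw [hslice]
  have hxlen : ((padN.drop t).take mm).length = mm := by
    simp [List.length_take, List.length_drop, hlenpad]
    omega
  rw [zip_eq_map_range _ kr 0 0 (by rw [hxlen]; exact hlkr), hxlen, List.map_map]
  rw [hmc, pyRange_zero_cast, List.map_map]
  simp only [Int.toNat_natCast]
  refine congrArg List.sum (List.map_congr_left (fun l hl => ?_))
  have hlm : l < mm := List.mem_range.mp hl
  simp only [Function.comp_def]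
  rw [getD_drop_take padN t mm l hlm,
      pad_getD row MM mm h0M h0m hrow t l ht hlm]
  unfold pvTerm
  rw [← hrowdef, ← hkr, hMc]
  simp [PySem.List.pyGetD_natCast]

-- one output pixel of B equals A's accumulated cell value
theorem cellB_eq (i N M n m : Int) (matrix cm : List (List Int))
    (hM : 0 < M) (_hn : 0 < n) (hm : 0 < m)
    (hrows : ∀ k ∈ List.range n.toNat, M ≤ ((pvRow i N n matrix (k : Int)).length : Int))
    (hker : ∀ k ∈ List.range n.toNat,
        m ≤ ((PySem.List.pyGetD cm (k : Int) []).length : Int))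
    (t : Nat) (ht : t < M.toNat) :
    ((((PySem.List.pyRange 0 n 1).map (pvPadRow i N M n m matrix)).zip cm).map
      (fun pk => (((PySem.List.slice pk.1 (some (t : Int)) (some ((t : Int) + m))).zip pk.2).map
        (fun pw => pw.1 * pw.2)).sum)).sum
    = pvCell i N M n m matrix cm (t : Int) := by
  have hMc : M = (M.toNat : Int) := (Int.toNat_of_nonneg (by omega)).symm
  have hmc : m = (m.toNat : Int) := (Int.toNat_of_nonneg (by omega)).symm
  have h0M : 0 < M.toNat := by omega
  have h0m : 0 < m.toNat := by omega
  have hcmlen : n.toNat ≤ cm.length := by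
    by_contra hc
    have hmem : cm.length ∈ List.range n.toNat := List.mem_range.mpr (by omega)
    have := hker cm.length hmem
    rw [PySem.List.pyGetD_natCast, List.getD_eq_default _ _ (le_refl _)] at this
    simp at this
    omega
  rw [pyRange_zero_cast n, List.map_map]
  simp only [Function.comp_def]
  rw [zip_eq_map_range _ cm [] [] (by simpa using hcmlen), List.map_map]
  simp only [Function.comp_def, List.length_map, List.length_range]
  unfold pvCell
  rw [pyRange_zero_cast n, List.map_map]
  simp only [Function.comp_def]
  refine congrArg List.sum (List.map_congr_left (fun k hk => ?_))
  have hkn : k < n.toNat := List.mem_range.mp hk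
  rw [PySem.List.getD_map_range (fun k : Nat => pvPadRow i N M n m matrix (k : Int))
      n.toNat k [] hkn]
  have hrowk := hrows k hk
  have hrowk' : M.toNat ≤ (pvRow i N n matrix (k : Int)).length := by omega
  have hkerk := hker k hk
  have hkerk' : m.toNat ≤ (cm.getD k []).length := by
    rw [← PySem.List.pyGetD_natCast cm k ([] : List Int)]
    omega
  exact kterm_eq i N M n m matrix cm M.toNat m.toNat hMc hmc h0M h0m
    (k : Int) (cm.getD k []) (PySem.List.pyGetD_natCast cm k ([] : List Int)).symm
    hrowk' hkerk' t ht

theorem portB_main (i N M n m : Int) (matrix convolution_matrix : List (List Int))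
    (hM : 0 < M) (hn : 0 < n) (hm : 0 < m)
    (hrows : ∀ k ∈ List.range n.toNat, M ≤ ((pvRow i N n matrix (k : Int)).length : Int))
    (hker : ∀ k ∈ List.range n.toNat,
        m ≤ ((PySem.List.pyGetD convolution_matrix (k : Int) []).length : Int)) :
    convolution_row_sequential_alt i N M n m matrix convolution_matrix
      = (PySem.List.pyRange 0 M 1).map (pvCell i N M n m matrix convolution_matrix) := by
  unfold convolution_row_sequential_alt
  rw [if_neg (by omega), if_neg (by omega)]
  simp only []
  rw [PySem.List.foldl_append_singleton_eq_map, List.nil_append]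
  rw [pyRange_zero_cast M, List.map_map, List.map_map]
  refine List.map_congr_left (fun t htm => ?_)
  have ht : t < M.toNat := List.mem_range.mp htm
  simp only [Function.comp_def]
  exact cellB_eq i N M n m matrix convolution_matrix hM hn hm hrows hker t ht

theorem ports_agree (i N M n m : Int) (matrix convolution_matrix : List (List Int))
    (hpre : Pre_convolution_row_sequential i N M n m matrix convolution_matrix) :
    convolution_row_sequential i N M n m matrix convolution_matrix
      = convolution_row_sequential_alt i N M n m matrix convolution_matrix := by
  rw [portA_eq]
  unfold Pre_convolution_row_sequential at hpre
  by_cases hM : M ≤ 0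
  · rw [convolution_row_sequential_alt, if_pos hM, PySem.List.pyRange_one_eq_nil hM, List.map_nil]
  · by_cases hnm : n ≤ 0 ∨ m ≤ 0
    · rw [convolution_row_sequential_alt, if_neg hM, if_pos hnm, PySem.List.pyRepeat_singleton]
      have hcell : ∀ j, pvCell i N M n m matrix convolution_matrix j = 0 := by
        intro j
        unfold pvCell
        rcases hnm with h | h
        · rw [PySem.List.pyRange_one_eq_nil h]; simp
        · rw [PySem.List.pyRange_one_eq_nil h]; simp
      rw [pyRange_zero_cast, List.map_map]
      simp only [Function.comp_def, hcell]
      simp [List.map_const']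
    · obtain ⟨hcml, htake, hrows⟩ := hpre (by omega) (by omega) (by omega)
      refine (portB_main i N M n m matrix convolution_matrix (by omega)
        (by omega : (0:Int) < n) (by omega : (0:Int) < m)
        (fun k hk => hrows k hk) (fun k hk => ?_)).symm
      have hkn : k < n.toNat := List.mem_range.mp hk
      have hkcm : k < convolution_matrix.length := by omega
      have hmem : convolution_matrix[k] ∈ convolution_matrix.take n.toNat := by
        have : (convolution_matrix.take n.toNat)[k]'(by simp; omega) = convolution_matrix[k] :=
          List.getElem_take
        rw [← this]
        exact List.getElem_mem _
      have := htake _ hmem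
      rw [PySem.List.pyGetD_natCast, List.getD_eq_getElem _ _ hkcm]
      omega

-- ===== VERDICT (by name: the statement is the Claim_ definition above) =====
theorem convolution_row_sequential_spec : Claim_equal_convolution_row_sequential := by
  intro i N M n m matrix convolution_matrix _ hpre
  unfold Spec_convolution_row_sequential
  exact ports_agree i N M n m matrix convolution_matrix hpre
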